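-- pv_equiv track=rewrite | github.com/alcadeta/hackerrank-solutions | problem-solving/breaking-the-records/solution.py | breaking_the_records
-- ===== SOURCE A (Python) =====
-- def breaking_the_records(scores):
--     highest = 0
--     record_highs = 0
--     lowest = 0
--     record_lows = 0
--
--     for i in range(0, len(scores)):
--         score = scores[i]
--
--         if i == 0:
--             highest = score
--             lowest = score
--         elif score > highest:
--             highest = score
--             record_highs += 1
--         elif score < lowest:
--             lowest = score
--             record_lows += 1
--
--     return [record_highs, record_lows]
-- ===== SOURCE B (Python) =====
-- def breaking_the_records(scores):
--     maxs = []
--     mins = []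
--     for s in scores:
--         maxs.append(s if not maxs else max(maxs[-1], s))
--         mins.append(s if not mins else min(mins[-1], s))
--     highs = sum(1 for a, b in zip(maxs, maxs[1:]) if b > a)
--     lows = sum(1 for a, b in zip(mins, mins[1:]) if b < a)
--     return [highs, lows]
-- ===== Notes on version B (the rewrite author's own statement) =====
-- stated objective: alternative
-- what changed: Replaces A's single indexed loop carrying four state variables by a two-phase decomposition: first build the running-maximum and running-minimum prefix tables, then count strict changes between adjacent table entries.
import Mathlib
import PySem

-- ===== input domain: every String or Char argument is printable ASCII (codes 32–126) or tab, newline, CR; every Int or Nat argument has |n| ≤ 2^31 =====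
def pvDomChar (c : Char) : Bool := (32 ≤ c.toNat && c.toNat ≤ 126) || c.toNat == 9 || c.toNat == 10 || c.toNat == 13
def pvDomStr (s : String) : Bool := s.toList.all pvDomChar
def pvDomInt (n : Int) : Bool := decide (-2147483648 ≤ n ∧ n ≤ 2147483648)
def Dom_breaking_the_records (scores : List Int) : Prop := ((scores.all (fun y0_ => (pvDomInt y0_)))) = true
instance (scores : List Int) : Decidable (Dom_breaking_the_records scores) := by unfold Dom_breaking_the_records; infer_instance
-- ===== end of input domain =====

-- B replaces A's single indexed loop carrying four state variables by a two-phase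
-- decomposition: build running-max/min prefix tables, then count strict adjacent changes
-- (objective: alternative; same O(n) cost).

-- ===== PORT A =====
-- literal port of A: for i in range(0, len(scores)) with state (highest, record_highs, lowest, record_lows);
-- scores[i] is always in range here, so pyGetD with default 0 is exact.
def pvLoopA (scores : List Int) (s : Int × Int × Int × Int) (i : Int) : Int × Int × Int × Int :=
  let score := PySem.List.pyGetD scores i 0
  if i == 0 then (score, s.2.1, score, s.2.2.2)
  else if score > s.1 then (score, s.2.1 + 1, s.2.2.1, s.2.2.2)
  else if score < s.2.2.1 then (s.1, s.2.1, score, s.2.2.2 + 1)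
  else s

def breaking_the_records (scores : List Int) : List Int :=
  let st := (PySem.List.pyRange 0 (scores.length : Int) 1).foldl (pvLoopA scores) (0, 0, 0, 0)
  [st.2.1, st.2.2.2]

-- ===== PORT B =====
-- running f-prefix continuation: maxs.append(f(maxs[-1], s)) with `prev` the last entry
def pvRunning (f : Int → Int → Int) (prev : Int) : List Int → List Int
  | [] => []
  | x :: xs => f prev x :: pvRunning f (f prev x) xs

-- the prefix table: first element is the score itself
def pvScan (f : Int → Int → Int) : List Int → List Int
  | [] => []
  | x :: xs => x :: pvRunning f x xs

-- sum(1 for a, b in zip(xs, xs[1:]) if p(a, b))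
def pvCountPairs (p : Int → Int → Bool) (xs : List Int) : Int :=
  (((xs.zip xs.tail).filter (fun ab => p ab.1 ab.2)).length : Int)

def breaking_the_records_alt (scores : List Int) : List Int :=
  [pvCountPairs (fun a b => b > a) (pvScan (fun a b => max a b) scores),
   pvCountPairs (fun a b => b < a) (pvScan (fun a b => min a b) scores)]

-- ===== PRECONDITION & SPEC =====
def Spec_breaking_the_records (scores : List Int) (out : List Int) : Prop := out = breaking_the_records_alt scores
instance (scores : List Int) (out : List Int) : Decidable (Spec_breaking_the_records scores out) := by unfold Spec_breaking_the_records; infer_instance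

-- ===== CLAIM (what is proved, stated in full; the proofs are below) =====
def Claim_equal_breaking_the_records : Prop := ∀ (scores : List Int), Dom_breaking_the_records scores → Spec_breaking_the_records scores (breaking_the_records scores)

-- ===== LEMMAS AND PROOFS =====

-- A's loop body for indices i ≥ 1, as a function of the score only
def pvStep (s : Int × Int × Int × Int) (x : Int) : Int × Int × Int × Int :=
  if x > s.1 then (x, s.2.1 + 1, s.2.2.1, s.2.2.2)
  else if x < s.2.2.1 then (s.1, s.2.1, x, s.2.2.2 + 1)
  else s

lemma pvCountPairs_nil (p : Int → Int → Bool) : pvCountPairs p [] = 0 := rfl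

lemma pvCountPairs_single (p : Int → Int → Bool) (a : Int) : pvCountPairs p [a] = 0 := rfl

lemma pvCountPairs_cons2 (p : Int → Int → Bool) (a b : Int) (t : List Int) :
    pvCountPairs p (a :: b :: t) = (if p a b then 1 else 0) + pvCountPairs p (b :: t) := by
  simp only [pvCountPairs, List.zip, List.tail, List.zipWith, List.filter]
  split_ifs with hp
  · simp [hp]; ring
  · simp [hp]

lemma pvMain (xs : List Int) : ∀ (h l rh rl : Int), l ≤ h →
    (xs.foldl pvStep (h, rh, l, rl)).2.1
      = rh + pvCountPairs (fun a b => b > a) (h :: pvRunning (fun a b => max a b) h xs) ∧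
    (xs.foldl pvStep (h, rh, l, rl)).2.2.2
      = rl + pvCountPairs (fun a b => b < a) (l :: pvRunning (fun a b => min a b) l xs) := by
  induction xs with
  | nil =>
    intro h l rh rl _
    simp [pvRunning, pvCountPairs_single]
  | cons x xs ih =>
    intro h l rh rl hle
    simp only [List.foldl_cons, pvRunning, pvCountPairs_cons2]
    by_cases h1 : x > h
    · have hmax : max h x = x := by omega
      have hmin : min l x = l := by omega
      have := ih x l (rh + 1) rl (by omega)
      rw [hmax, hmin]
      constructor
      · rw [(by simp [pvStep, h1] : pvStep (h, rh, l, rl) x = (x, rh + 1, l, rl)), this.1]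
        simp [h1]; try ring
      · rw [(by simp [pvStep, h1] : pvStep (h, rh, l, rl) x = (x, rh + 1, l, rl)), this.2]
        simp
    · by_cases h2 : x < l
      · have hmax : max h x = h := by omega
        have hmin : min l x = x := by omega
        have := ih h x rh (rl + 1) (by omega)
        rw [hmax, hmin]
        have hstep : pvStep (h, rh, l, rl) x = (h, rh, x, rl + 1) := by
          simp [pvStep, h1, h2]
        constructor
        · rw [hstep, this.1]
          simp
        · rw [hstep, this.2]
          simp [h2]; try ring
      · have hmax : max h x = h := by omega
        have hmin : min l x = l := by omega
        have := ih h l rh rl hle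
        rw [hmax, hmin]
        have hstep : pvStep (h, rh, l, rl) x = (h, rh, l, rl) := by
          simp [pvStep, h1, h2]
        constructor
        · rw [hstep, this.1]
          simp
        · rw [hstep, this.2]
          simp

-- ===== VERDICT (by name: the statement is the Claim_ definition above) =====
lemma pvAfold_cons (x : Int) (xs : List Int) :
    (PySem.List.pyRange 0 (((x :: xs).length : Int)) 1).foldl (pvLoopA (x :: xs)) (0, 0, 0, 0)
      = xs.foldl pvStep (x, 0, x, 0) := by
  have hn : (0 : Int) < ((x :: xs).length : Int) := by simp
  rw [PySem.List.pyRange_one_cons hn, List.foldl_cons]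
  have h0 : pvLoopA (x :: xs) (0, 0, 0, 0) 0 = (x, 0, x, 0) := by
    simp [pvLoopA, PySem.List.pyGetD, PySem.List.pyGet?, PySem.List.pyIdx?]
  rw [h0]
  have hcongr :
      (PySem.List.pyRange (0 + 1) (((x :: xs).length : Int)) 1).foldl (pvLoopA (x :: xs)) (x, 0, x, 0)
        = (PySem.List.pyRange (0 + 1) (((x :: xs).length : Int)) 1).foldl
            (fun s i => pvStep s (PySem.List.pyGetD (x :: xs) i 0)) (x, 0, x, 0) := by
    apply PySem.List.foldl_congr_mem
    intro acc i hi
    have h1 : (1 : Int) ≤ i := by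
      have := (PySem.List.mem_pyRange_one.1 hi).1
      omega
    have hne : (i == (0 : Int)) = false := by simp; omega
    simp [pvLoopA, pvStep, hne]
  rw [hcongr]
  rw [PySem.List.foldl_pyRange_pyGetD' (ha := by omega)]
  rfl

theorem breaking_the_records_spec : Claim_equal_breaking_the_records := by
  intro scores _
  unfold Spec_breaking_the_records breaking_the_records breaking_the_records_alt
  cases scores with
  | nil => simp [PySem.List.pyRange_one_eq_nil, pvScan, pvCountPairs_nil]
  | cons x xs =>
    rw [pvAfold_cons x xs]
    have := pvMain xs x x 0 0 le_rfl
    simp only [pvScan]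
    rw [this.1, this.2]
    simp
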